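-- pv_equiv track=rewrite | github.com/Lussebullen/Math182 | ChainRestaurant.py | iterprof
-- ===== SOURCE A (Python) =====
-- def iterprof(A,k):
--     #Iterable version
--     n = len(A)
--     memo = [-1] * n
--     memo[0] = A[0]
--     for i in range(1,n):
--         if i-k>=0:
--             memo[i] = max(memo[i-k] + A[i], memo[i-1])
--         else:
--             memo[i] = max(A[i], memo[i-1])
--     return memo[n-1]
-- ===== SOURCE B (Python) =====
-- def iterprof(A, k):
--     # Top-down memoized recursion on f(i) = best admissible profit for the
--     # prefix ending at i; the warm-up loop seeds the memo every 400 indices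
--     # so the recursion depth stays bounded without touching the limit.
--     n = len(A)
--     memo = {}
--
--     def f(i):
--         if i in memo:
--             return memo[i]
--         if i == 0:
--             r = A[0]
--         elif i - k >= 0:
--             r = max(f(i - k) + A[i], f(i - 1))
--         else:
--             r = max(A[i], f(i - 1))
--         memo[i] = r
--         return r
--
--     for i in range(0, n, 400):
--         f(i)
--     return f(n - 1)
-- ===== Notes on version B (the rewrite author's own statement) =====
-- stated objective: alternative
-- what changed: Replaces A's bottom-up memo array filled by an index loop with a top-down memoized recursion: a dict memo and a recursive f(i) computed on demand from f(i-1)/f(i-k), plus a stride warm-up loop that seeds the memo so the recursion depth stays bounded.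
-- outside the precondition, e.g. on iterprof([0, 3], 0): A returns 2, B raises RecursionError
import Mathlib
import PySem

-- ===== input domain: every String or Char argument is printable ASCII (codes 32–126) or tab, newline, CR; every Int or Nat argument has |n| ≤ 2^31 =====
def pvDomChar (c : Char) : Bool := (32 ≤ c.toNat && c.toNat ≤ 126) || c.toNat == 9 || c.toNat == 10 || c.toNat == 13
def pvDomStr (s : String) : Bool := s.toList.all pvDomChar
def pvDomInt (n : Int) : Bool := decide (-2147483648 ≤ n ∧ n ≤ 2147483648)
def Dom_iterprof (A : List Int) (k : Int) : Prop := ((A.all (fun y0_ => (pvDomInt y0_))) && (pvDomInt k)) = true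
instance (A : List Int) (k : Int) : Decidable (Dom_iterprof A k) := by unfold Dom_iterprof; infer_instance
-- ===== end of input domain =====

-- B replaces A's bottom-up memo array with a top-down memoized recursion
-- (dict memo, demand-driven f(i-1)/f(i-k) calls, stride warm-up bounding the
-- recursion depth): an alternative decomposition of the same DP, same cost.


-- ===== PORT A =====
-- literal transliteration of A; pyGetD/pySetD with default 0 are exact on Pre_ (all indices in range there)
-- the body of A's for-loop
def astep (A : List Int) (k : Int) (memo : List Int) (i : Int) : List Int :=
  if i - k ≥ 0 then
    PySem.List.pySetD memo i
      (max (PySem.List.pyGetD memo (i - k) 0 + PySem.List.pyGetD A i 0)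
           (PySem.List.pyGetD memo (i - 1) 0))
  else
    PySem.List.pySetD memo i
      (max (PySem.List.pyGetD A i 0) (PySem.List.pyGetD memo (i - 1) 0))

def iterprof (A : List Int) (k : Int) : Int :=
  let n : Int := (A.length : Int)
  let memo : List Int := List.replicate A.length (-1)
  let memo := PySem.List.pySetD memo 0 (PySem.List.pyGetD A 0 0)
  let memo := (PySem.List.pyRange 1 n 1).foldl (astep A k) memo
  PySem.List.pyGetD memo (n - 1) 0

-- ===== PORT B =====
-- literal transliteration of Source B's inner recursion f; the fuel argument models
-- Python's recursion limit (fuel 0 = RecursionError; with the stride warm-up the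
-- depth never exceeds the fuel supplied below on the inputs Pre_ admits)
def fB (A : List Int) (k : Int) : Nat → PySem.Dict Int Int → Int → Int × PySem.Dict Int Int
  | 0, memo, _ => (0, memo)
  | fuel + 1, memo, i =>
    match memo.get? i with
    | some v => (v, memo)
    | none =>
      if i = 0 then
        let r := PySem.List.pyGetD A 0 0
        (r, memo.insert i r)
      else if i - k ≥ 0 then
        let p1 := fB A k fuel memo (i - k)
        let p2 := fB A k fuel p1.2 (i - 1)
        let r := max (p1.1 + PySem.List.pyGetD A i 0) p2.1
        (r, p2.2.insert i r)
      else
        let p2 := fB A k fuel memo (i - 1)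
        let r := max (PySem.List.pyGetD A i 0) p2.1
        (r, p2.2.insert i r)

def iterprof_alt (A : List Int) (k : Int) : Int :=
  let n : Int := (A.length : Int)
  let memo := (PySem.List.pyRange 0 n 400).foldl
    (fun m i => (fB A k (A.length + 1) m i).2) PySem.Dict.empty
  (fB A k (A.length + 1) memo (n - 1)).1

-- ===== PRECONDITION & SPEC =====
-- Pre_ excludes the empty list and k < 0 with ≥ 2 elements, where A raises
-- IndexError (B raises too), and k = 0 with ≥ 2 elements, where A returns a
-- value depending on its -1 sentinel while B's recursion f(i) → f(i-k) = f(i)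
-- calls itself and raises RecursionError.
def Pre_iterprof (A : List Int) (k : Int) : Prop := A ≠ [] ∧ (1 ≤ k ∨ A.length = 1)
instance (A : List Int) (k : Int) : Decidable (Pre_iterprof A k) := by unfold Pre_iterprof; infer_instance
def pvWitness_iterprof : List Int × Int := ([1, 2, 3], 2)

def Spec_iterprof (A : List Int) (k : Int) (out : Int) : Prop := out = iterprof_alt A k
instance (A : List Int) (k : Int) (out : Int) : Decidable (Spec_iterprof A k out) := by unfold Spec_iterprof; infer_instance

-- ===== CLAIM (what is proved, stated in full; the proofs are below) =====
def Claim_equal_iterprof : Prop := ∀ (A : List Int) (k : Int), Dom_iterprof A k → Pre_iterprof A k → Spec_iterprof A k (iterprof A k)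

-- ===== LEMMAS AND PROOFS =====

-- reference recurrence: the value A's loop stores at index i (for 1 ≤ k)
def afun (A : List Int) (k : Int) : Nat → Int
  | 0 => A.getD 0 0
  | (i+1) =>
    if ((i : Int) + 1) - k ≥ 0 then
      max ((if h : 1 ≤ k then afun A k (i + 1 - k.toNat) else -1) + A.getD (i+1) 0) (afun A k i)
    else
      max (A.getD (i+1) 0) (afun A k i)
  termination_by i => i
  decreasing_by all_goals omega

-- A's memo after processing range(1, j)
def memoSpec (A : List Int) (k : Int) (j : Nat) : List Int :=
  (List.range A.length).map (fun p => if p < j then afun A k p else -1)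

theorem memoSpec_length (A : List Int) (k : Int) (j : Nat) :
    (memoSpec A k j).length = A.length := by
  simp [memoSpec]

theorem memoSpec_getD (A : List Int) (k : Int) (j : Nat) (i : Int)
    (h0 : 0 ≤ i) (hn : i < A.length) :
    PySem.List.pyGetD (memoSpec A k j) i 0 = if i.toNat < j then afun A k i.toNat else -1 := by
  rw [PySem.List.pyGetD_eq_getElem _ _ h0 (by rw [memoSpec_length]; exact_mod_cast hn)]
  simp only [memoSpec, List.getElem_map, List.getElem_range]

theorem memoSpec_set (A : List Int) (k : Int) (j : Nat) (hj : j < A.length) :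
    PySem.List.pySetD (memoSpec A k j) (j : Int) (afun A k j) = memoSpec A k (j+1) := by
  rw [PySem.List.pySetD_of_nonneg _ _ (by positivity)]
  apply List.ext_getElem
  · simp [memoSpec]
  · intro p hp1 hp2
    simp only [memoSpec, List.length_map, List.length_range] at hp2
    rw [List.getElem_set]
    simp only [memoSpec, List.getElem_map, List.getElem_range, Int.toNat_natCast]
    by_cases hpj : p = j
    · subst hpj; simp
    · rw [if_neg (by omega : ¬ j = p)]
      by_cases h1 : p < j
      · rw [if_pos h1, if_pos (by omega)]
      · rw [if_neg h1, if_neg (by omega)]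

theorem astep_memoSpec (A : List Int) (k : Int) (hk : 0 ≤ k) (i : Nat)
    (hj : i + 1 < A.length) :
    astep A k (memoSpec A k (i+1)) (((i+1 : Nat)) : Int) = memoSpec A k (i+2) := by
  have hgA : PySem.List.pyGetD A ((i+1 : Nat) : Int) 0 = A.getD (i+1) 0 :=
    PySem.List.pyGetD_natCast A (i+1) 0
  have hgPrev : PySem.List.pyGetD (memoSpec A k (i+1)) (((i+1:Nat):Int) - 1) 0 = afun A k i := by
    rw [memoSpec_getD A k (i+1) _ (by omega) (by push_cast; omega)]
    rw [if_pos (by omega)]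
    congr 1
    omega
  have hcond : ((((i+1:Nat)):Int) - k ≥ 0) ↔ (((i:Int) + 1) - k ≥ 0) := by push_cast; omega
  rw [astep]
  by_cases hc : (((i+1:Nat)):Int) - k ≥ 0
  · rw [if_pos hc]
    have hgK : PySem.List.pyGetD (memoSpec A k (i+1)) ((((i+1:Nat)):Int) - k) 0 =
        (if h : 1 ≤ k then afun A k (i + 1 - k.toNat) else -1) := by
      rw [memoSpec_getD A k (i+1) _ (by omega) (by push_cast; omega)]
      by_cases hk1 : 1 ≤ k
      · rw [if_pos (by omega), dif_pos hk1]
        congr 1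
        omega
      · have hk0 : k = 0 := by omega
        subst hk0
        rw [if_neg (by simp), dif_neg (by omega)]
    rw [hgK, hgA, hgPrev]
    have hval : max ((if h : 1 ≤ k then afun A k (i + 1 - k.toNat) else -1) + A.getD (i+1) 0)
        (afun A k i) = afun A k (i+1) := by
      rw [afun, if_pos (hcond.mp hc)]
    rw [hval]
    have := memoSpec_set A k (i+1) hj
    push_cast at this ⊢
    rw [this]
  · rw [if_neg hc, hgA, hgPrev]
    have hval : max (A.getD (i+1) 0) (afun A k i) = afun A k (i+1) := by
      rw [afun, if_neg (fun h => hc (hcond.mpr h))]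
    rw [hval]
    have := memoSpec_set A k (i+1) hj
    push_cast at this ⊢
    rw [this]

theorem memo_inv (A : List Int) (k : Int) (hk : 0 ≤ k) (j : Nat)
    (h1 : 1 ≤ j) (hj : j ≤ A.length) :
    (PySem.List.pyRange 1 (j : Int) 1).foldl (astep A k)
      (PySem.List.pySetD (List.replicate A.length (-1)) 0 (PySem.List.pyGetD A 0 0))
      = memoSpec A k j := by
  induction j with
  | zero => omega
  | succ j ih =>
    by_cases hj1 : 1 ≤ j
    · have hcast : ((j + 1 : Nat) : Int) = ((j:Int)) + 1 := by push_cast; ring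
      obtain ⟨i, rfl⟩ : ∃ i, j = i + 1 := ⟨j - 1, by omega⟩
      rw [hcast, PySem.List.pyRange_one_succ_right (by exact_mod_cast hj1),
          List.foldl_append, ih hj1 (by omega)]
      exact astep_memoSpec A k hk i (by omega)
    · have hj0 : j = 0 := by omega
      subst hj0
      rw [show ((0 + 1 : Nat) : Int) = 1 by norm_num,
          PySem.List.pyRange_one_eq_nil (by norm_num), List.foldl_nil]
      rw [PySem.List.pySetD_of_nonneg _ _ (by norm_num)]
      apply List.ext_getElem
      · simp [memoSpec]
      · intro p hp1 hp2
        simp only [memoSpec, List.length_map, List.length_range] at hp2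
        rw [List.getElem_set]
        simp only [memoSpec, List.getElem_map, List.getElem_range]
        by_cases hp0 : p = 0
        · subst hp0
          simp [afun, PySem.List.pyGetD_zero]
        · simp only [if_neg (by omega : ¬ (0:Int).toNat = p), List.getElem_replicate,
            if_neg (by omega : ¬ p < 0 + 1)]

theorem iterprof_eq_afun (A : List Int) (k : Int) (hA : A ≠ []) (hk : 0 ≤ k) :
    iterprof A k = afun A k (A.length - 1) := by
  have hlen : 1 ≤ A.length := List.length_pos_iff.mpr hA
  rw [iterprof]
  rw [memo_inv A k hk A.length hlen (le_refl _)]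
  rw [memoSpec_getD A k A.length _ (by omega) (by omega)]
  rw [if_pos (by omega)]
  congr 1
  omega

-- B-side invariant: every memo entry is correct
def GoodMemo (A : List Int) (k : Int) (memo : PySem.Dict Int Int) : Prop :=
  ∀ j v, memo.get? j = some v → 0 ≤ j ∧ v = afun A k j.toNat

theorem goodMemo_insert (A : List Int) (k : Int) (memo : PySem.Dict Int Int)
    (hm : GoodMemo A k memo) (i : Int) (hi : 0 ≤ i) :
    GoodMemo A k (memo.insert i (afun A k i.toNat)) := by
  intro j v hj
  rw [PySem.Dict.get?_insert] at hj
  split_ifs at hj with hji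
  · subst hji; cases hj; exact ⟨hi, rfl⟩
  · exact hm j v hj

-- the memoized recursion computes afun and keeps the memo correct
theorem fB_correct (A : List Int) (k : Int) (hk : 1 ≤ k) :
    ∀ (fuel : Nat) (memo : PySem.Dict Int Int) (i : Int),
      GoodMemo A k memo → 0 ≤ i → i.toNat < fuel →
      (fB A k fuel memo i).1 = afun A k i.toNat ∧ GoodMemo A k (fB A k fuel memo i).2 := by
  intro fuel
  induction fuel with
  | zero => intro memo i _ _ h; omega
  | succ fuel ih =>
    intro memo i hm hi hfuel
    rw [fB]
    cases hget : memo.get? i with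
    | some v =>
      simp only
      exact ⟨(hm i v hget).2, hm⟩
    | none =>
      simp only
      by_cases hi0 : i = 0
      · subst hi0
        rw [if_pos rfl]
        refine ⟨?_, ?_⟩
        · show PySem.List.pyGetD A 0 0 = afun A k (0:Int).toNat
          rw [show ((0:Int)).toNat = 0 by omega, afun]
          exact PySem.List.pyGetD_natCast A 0 0
        · show GoodMemo A k (memo.insert 0 (PySem.List.pyGetD A 0 0))
          have : PySem.List.pyGetD A 0 0 = afun A k ((0:Int)).toNat := by
            rw [show ((0:Int)).toNat = 0 by omega, afun]
            exact PySem.List.pyGetD_natCast A 0 0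
          rw [this]
          exact goodMemo_insert A k memo hm 0 le_rfl
      · rw [if_neg hi0]
        obtain ⟨m, hmeq⟩ : ∃ m, i.toNat = m + 1 := ⟨i.toNat - 1, by omega⟩
        have hiM : i = ((m : Int)) + 1 := by omega
        by_cases hik : i - k ≥ 0
        · rw [if_pos hik]
          have h1 := ih memo (i - k) hm (by omega) (by omega)
          have h2 := ih (fB A k fuel memo (i - k)).2 (i - 1) h1.2 (by omega) (by omega)
          have hval : max ((fB A k fuel memo (i - k)).1 + PySem.List.pyGetD A i 0)
              (fB A k fuel (fB A k fuel memo (i - k)).2 (i - 1)).1 = afun A k i.toNat := by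
            rw [h1.1, h2.1, hmeq, afun, if_pos (by omega : ((m:Int) + 1) - k ≥ 0), dif_pos hk]
            have e1 : (i - k).toNat = m + 1 - k.toNat := by omega
            have e2 : (i - 1).toNat = m := by omega
            have e3 : PySem.List.pyGetD A i 0 = A.getD (m+1) 0 := by
              rw [show i = ((m+1 : Nat) : Int) by omega]
              exact PySem.List.pyGetD_natCast A (m+1) 0
            rw [e1, e2, e3]
          refine ⟨hval, ?_⟩
          have := goodMemo_insert A k _ h2.2 i (by omega)
          rw [← hval] at this
          exact this
        · rw [if_neg hik]
          have h2 := ih memo (i - 1) hm (by omega) (by omega)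
          have hval : max (PySem.List.pyGetD A i 0) (fB A k fuel memo (i - 1)).1
              = afun A k i.toNat := by
            rw [h2.1, hmeq, afun, if_neg (by omega : ¬ ((m:Int) + 1) - k ≥ 0)]
            have e2 : (i - 1).toNat = m := by omega
            have e3 : PySem.List.pyGetD A i 0 = A.getD (m+1) 0 := by
              rw [show i = ((m+1 : Nat) : Int) by omega]
              exact PySem.List.pyGetD_natCast A (m+1) 0
            rw [e2, e3]
          refine ⟨hval, ?_⟩
          have := goodMemo_insert A k _ h2.2 i (by omega)
          rw [← hval] at this
          exact this

theorem foldl_fB_good (A : List Int) (k : Int) (hk : 1 ≤ k) (l : List Int)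
    (hl : ∀ x ∈ l, 0 ≤ x ∧ x.toNat < A.length + 1) :
    ∀ m, GoodMemo A k m →
      GoodMemo A k (l.foldl (fun m i => (fB A k (A.length + 1) m i).2) m) := by
  induction l with
  | nil => intro m hm; exact hm
  | cons x t iht =>
    intro m hm
    have hx := hl x (by simp)
    exact iht (fun y hy => hl y (by simp [hy])) _
      (fB_correct A k hk (A.length + 1) m x hm hx.1 hx.2).2

theorem stride_good (A : List Int) (k : Int) (hk : 1 ≤ k) :
    GoodMemo A k ((PySem.List.pyRange 0 (A.length : Int) 400).foldl
      (fun m i => (fB A k (A.length + 1) m i).2) PySem.Dict.empty) := by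
  have hInit : GoodMemo A k PySem.Dict.empty := by
    intro j v hj
    rw [PySem.Dict.get?_empty] at hj
    exact absurd hj (by simp)
  refine foldl_fB_good A k hk _ ?_ _ hInit
  intro x hx
  have := (PySem.List.mem_pyRange_iff_of_pos (by norm_num : (0:Int) < 400) x).mp hx
  omega

theorem alt_eq_afun (A : List Int) (k : Int) (hA : A ≠ []) (hk : 1 ≤ k) :
    iterprof_alt A k = afun A k (A.length - 1) := by
  have hlen : 1 ≤ A.length := List.length_pos_iff.mpr hA
  rw [iterprof_alt]
  have hgood := stride_good A k hk
  have := fB_correct A k hk (A.length + 1) _ ((A.length : Int) - 1) hgood (by omega) (by omega)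
  rw [this.1]
  congr 1
  omega

set_option maxRecDepth 4096 in
theorem singleton_case (a : Int) (k : Int) :
    iterprof [a] k = a ∧ iterprof_alt [a] k = a := by
  constructor
  · rfl
  · simp only [iterprof_alt, List.length_cons, List.length_nil]
    norm_num
    rfl

-- ===== VERDICT (by name: the statement is the Claim_ definition above) =====
theorem iterprof_spec : Claim_equal_iterprof := by
  intro A k _ hPre
  unfold Spec_iterprof
  obtain ⟨hA, hk1 | hn1⟩ := hPre
  · rw [iterprof_eq_afun A k hA (by omega), alt_eq_afun A k hA hk1]
  · obtain ⟨a, rfl⟩ : ∃ a, A = [a] := by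
      cases A with
      | nil => simp at hn1
      | cons a l =>
        cases l with
        | nil => exact ⟨a, rfl⟩
        | cons b t => simp at hn1
    rw [(singleton_case a k).1, (singleton_case a k).2]
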